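-- pv_equiv track=rewrite | github.com/nishi10mo/AtCoder | practice/AtCoder Beginner Contest/ABC290/B.py | f
-- ===== SOURCE A (Python) =====
-- def f(N, K, S):
--     k = 0
--     results = []
--     for i in range(N):
--         if k == K:
--             results.append("x")
--         else:
--             if S[i] == "o":
--                 k += 1
--                 results.append("o")
--             else:
--                 results.append("x")
--     return "".join(results)
-- ===== SOURCE B (Python) =====
-- def f(N, K, S):
--     kept = set()
--     for i in range(N):
--         if len(kept) == K:
--             break
--         if S[i] == "o":
--             kept.add(i)
--     return "".join("o" if i in kept else "x" for i in range(N))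
-- ===== Notes on version B (the rewrite author's own statement) =====
-- stated objective: alternative
-- what changed: Replaces the single counter-carrying loop with two phases: a first scan that collects the indices of the first K 'o's into a set (stopping once K are found), then a membership-driven reconstruction pass over range(N).
import Mathlib
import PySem

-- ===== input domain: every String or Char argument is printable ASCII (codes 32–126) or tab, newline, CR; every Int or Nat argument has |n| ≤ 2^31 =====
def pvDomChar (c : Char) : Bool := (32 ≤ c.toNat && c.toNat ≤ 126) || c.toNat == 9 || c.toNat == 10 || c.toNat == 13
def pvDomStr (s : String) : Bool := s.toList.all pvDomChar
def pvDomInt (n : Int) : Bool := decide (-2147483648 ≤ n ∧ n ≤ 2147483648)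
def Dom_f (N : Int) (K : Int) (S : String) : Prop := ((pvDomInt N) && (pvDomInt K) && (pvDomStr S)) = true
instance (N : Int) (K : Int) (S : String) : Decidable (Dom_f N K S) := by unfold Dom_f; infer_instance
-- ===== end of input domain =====

-- B replaces A's counter-carrying single loop by an index-collection phase plus a
-- membership-driven reconstruction pass (objective: alternative decomposition, same cost).

-- ===== PORT A =====
-- one iteration of A's loop over state (k, results)
def fStep (K : Int) (S : String) (st : Int × List String) (i : Int) : Int × List String :=
  if st.1 == K then (st.1, st.2 ++ ["x"])
  else
    match PySem.Str.pyGet? S i with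
    | some c => if c == 'o' then (st.1 + 1, st.2 ++ ["o"]) else (st.1, st.2 ++ ["x"])
    | none => (st.1, st.2 ++ ["x"])  -- Python raises IndexError here; such inputs are outside Pre_f

def f (N : Int) (K : Int) (S : String) : String :=
  PySem.Str.join "" (((PySem.List.pyRange 0 N 1).foldl (fStep K S) (0, [])).2)

-- ===== PORT B =====
-- first pass of B: collect indices of 'o' into the set, breaking once its size is K
def fCollect (K : Int) (S : String) : List Int → PySem.Set Int → PySem.Set Int
  | [], kept => kept
  | i :: rest, kept =>
    if PySem.Set.len kept == K then kept
    else
      match PySem.Str.pyGet? S i with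
      | some c =>
          if c == 'o' then fCollect K S rest (PySem.Set.add kept i)
          else fCollect K S rest kept
      | none => fCollect K S rest kept  -- Python raises IndexError here; such inputs are outside Pre_f

def f_alt (N : Int) (K : Int) (S : String) : String :=
  let kept := fCollect K S (PySem.List.pyRange 0 N 1) PySem.Set.empty
  PySem.Str.join "" ((PySem.List.pyRange 0 N 1).map
    (fun i => if PySem.Set.contains kept i then "o" else "x"))

-- ===== PRECONDITION & SPEC =====
-- Pre_f excludes exactly the inputs where A raises IndexError: N exceeds len(S) while
-- the counter cannot reach K early (K negative or more than the number of 'o' in S).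
def Pre_f (N : Int) (K : Int) (S : String) : Prop :=
  N ≤ PySem.Str.len S ∨ (0 ≤ K ∧ K ≤ (S.toList.count 'o' : Int))
instance (N : Int) (K : Int) (S : String) : Decidable (Pre_f N K S) := by
  unfold Pre_f; infer_instance

def pvWitness_f : Int × Int × String := (6, 2, "oxooxo")

def Spec_f (N : Int) (K : Int) (S : String) (out : String) : Prop := out = f_alt N K S
instance (N : Int) (K : Int) (S : String) (out : String) : Decidable (Spec_f N K S out) := by
  unfold Spec_f; infer_instance

-- ===== CLAIM (what is proved, stated in full; the proofs are below) =====
def Claim_equal_f : Prop := ∀ (N : Int) (K : Int) (S : String), Dom_f N K S → Pre_f N K S → Spec_f N K S (f N K S)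

-- ===== LEMMAS AND PROOFS =====

-- once the counter equals K, A appends "x" forever
lemma foldl_fStep_const (K : Int) (S : String) (L : List Int) (acc : List String) :
    (L.foldl (fStep K S) (K, acc)).2 = acc ++ L.map (fun _ => "x") := by
  induction L generalizing acc with
  | nil => simp
  | cons i rest ih => simp [fStep, ih]

-- fCollect only ever adds indices taken from its list
lemma mem_fCollect (K : Int) (S : String) (L : List Int) (kept : PySem.Set Int) (x : Int)
    (hx : x ∈ fCollect K S L kept) : x ∈ kept ∨ x ∈ L := by
  induction L generalizing kept with
  | nil => exact Or.inl (by simpa [fCollect] using hx)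
  | cons i rest ih =>
    simp only [fCollect] at hx
    split at hx
    · exact Or.inl hx
    · split at hx
      · split at hx
        · rcases ih _ hx with h | h
          · rcases (PySem.Set.mem_add _ _ _).1 h with h | h
            · exact Or.inl h
            · exact Or.inr (by simp [h])
          · exact Or.inr (List.mem_cons_of_mem _ h)
        · rcases ih _ hx with h | h
          · exact Or.inl h
          · exact Or.inr (List.mem_cons_of_mem _ h)
      · rcases ih _ hx with h | h
        · exact Or.inl h
        · exact Or.inr (List.mem_cons_of_mem _ h)

-- fCollect never removes an element
lemma subset_fCollect (K : Int) (S : String) (L : List Int) (kept : PySem.Set Int) (x : Int)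
    (hx : x ∈ kept) : x ∈ fCollect K S L kept := by
  induction L generalizing kept with
  | nil => simpa [fCollect]
  | cons i rest ih =>
    simp only [fCollect]
    split
    · exact hx
    · split
      · split
        · exact ih _ ((PySem.Set.mem_add _ _ _).2 (Or.inl hx))
        · exact ih _ hx
      · exact ih _ hx

-- main lockstep invariant: A's produced suffix equals B's reconstruction by the final set
lemma main_inv (K : Int) (S : String) :
    ∀ (L : List Int) (k : Int) (kept : PySem.Set Int) (acc : List String),
      L.Pairwise (· < ·) → (∀ x ∈ kept, ∀ i ∈ L, x < i) → k = PySem.Set.len kept →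
      (L.foldl (fStep K S) (k, acc)).2 =
        acc ++ L.map (fun i => if PySem.Set.contains (fCollect K S L kept) i then "o" else "x") := by
  intro L
  induction L with
  | nil => intro k kept acc _ _ _; simp
  | cons i rest ih =>
    intro k kept acc hpw hlt hk
    have hpw' : rest.Pairwise (· < ·) := hpw.of_cons
    have hi_rest : ∀ j ∈ rest, i < j := fun j hj => List.rel_of_pairwise_cons hpw hj
    by_cases hkK : k = K
    · -- both break: A appends only "x", B returns kept, containing no element of i :: rest
      have hKlen : (PySem.Set.len kept == K) = true := by
        rw [← hk, hkK]; simp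
      have hnot : ∀ j ∈ (i :: rest), PySem.Set.contains kept j = false := by
        intro j hj
        rw [Bool.eq_false_iff]
        intro hc
        have := hlt j ((PySem.Set.contains_iff _ _).1 hc) j hj
        omega
      simp only [fCollect, hKlen, if_pos]
      rw [List.foldl_cons]
      have : fStep K S (k, acc) i = (K, acc ++ ["x"]) := by simp [fStep, hkK]
      rw [this, foldl_fStep_const]
      have hmap : (i :: rest).map (fun j => if PySem.Set.contains kept j then "o" else "x")
          = (i :: rest).map (fun _ => "x") := by
        apply List.map_congr_left
        intro j hj
        simp only [hnot j hj, Bool.false_eq_true, if_false]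
      rw [hmap]; simp
    · have hKlen : (PySem.Set.len kept == K) = false := by
        rw [← hk]; simpa using hkK
      simp only [fCollect, hKlen, Bool.false_eq_true, if_false]
      rw [List.foldl_cons]
      have hstep : fStep K S (k, acc) i =
          match PySem.Str.pyGet? S i with
          | some c => if c == 'o' then (k + 1, acc ++ ["o"]) else (k, acc ++ ["x"])
          | none => (k, acc ++ ["x"]) := by
        simp [fStep, hkK]
      cases hg : PySem.Str.pyGet? S i with
      | none =>
        rw [hstep, hg]
        have hiF : PySem.Set.contains (fCollect K S rest kept) i = false := by
          rw [Bool.eq_false_iff]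
          intro hc
          rcases mem_fCollect K S rest kept i ((PySem.Set.contains_iff _ _).1 hc) with h | h
          · exact absurd (hlt i h i (by simp)) (by omega)
          · exact absurd (hi_rest i h) (by omega)
        have hiF' : i ∉ fCollect K S rest kept := by
          rw [← PySem.Set.contains_iff, hiF]; exact Bool.false_ne_true
        rw [ih k kept (acc ++ ["x"]) hpw'
          (fun x hx j hj => hlt x hx j (List.mem_cons_of_mem _ hj)) hk]
        simp [hiF']
      | some c =>
        by_cases hc : c = 'o'
        · -- 'o' branch: A appends "o", B adds i
          rw [hstep, hg]
          have hiK : i ∉ kept := fun h => absurd (hlt i h i (by simp)) (by omega)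
          have hcK : PySem.Set.contains kept i = false := by
            rw [Bool.eq_false_iff]
            exact fun h => hiK ((PySem.Set.contains_iff kept i).1 h)
          have hlen : k + 1 = PySem.Set.len (PySem.Set.add kept i) := by
            rw [hk, PySem.Set.len_eq, PySem.Set.len_eq]
            simp only [PySem.Set.add, hcK, Bool.false_eq_true, if_false,
              List.length_append, List.length_singleton]
            push_cast
            ring
          have hlt' : ∀ x ∈ PySem.Set.add kept i, ∀ j ∈ rest, x < j := by
            intro x hx j hj
            rcases (PySem.Set.mem_add _ _ _).1 hx with h | h
            · exact hlt x h j (List.mem_cons_of_mem _ hj)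
            · exact h ▸ hi_rest j hj
          have hiF : i ∈ fCollect K S rest (PySem.Set.add kept i) :=
            subset_fCollect K S rest _ i ((PySem.Set.mem_add _ _ _).2 (Or.inr rfl))
          simp only [hc, beq_self_eq_true, if_pos]
          rw [ih (k + 1) (PySem.Set.add kept i) (acc ++ ["o"]) hpw' hlt' hlen]
          simp [hiF]
        · rw [hstep, hg]
          have hiF : PySem.Set.contains (fCollect K S rest kept) i = false := by
            rw [Bool.eq_false_iff]
            intro hcc
            rcases mem_fCollect K S rest kept i ((PySem.Set.contains_iff _ _).1 hcc) with h | h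
            · exact absurd (hlt i h i (by simp)) (by omega)
            · exact absurd (hi_rest i h) (by omega)
          have hcb : (c == 'o') = false := by simpa using hc
          simp only [hcb, Bool.false_eq_true, if_false]
          have hiF' : i ∉ fCollect K S rest kept := by
            rw [← PySem.Set.contains_iff, hiF]; exact Bool.false_ne_true
          rw [ih k kept (acc ++ ["x"]) hpw'
            (fun x hx j hj => hlt x hx j (List.mem_cons_of_mem _ hj)) hk]
          simp [hiF']

-- ===== VERDICT (by name: the statement is the Claim_ definition above) =====
theorem f_spec : Claim_equal_f := by
  intro N K S _ _
  unfold Spec_f f f_alt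
  rw [main_inv K S (PySem.List.pyRange 0 N 1) 0 PySem.Set.empty []
    (PySem.List.pairwise_lt_pyRange_one 0 N)
    (by intro x hx; simp [PySem.Set.empty] at hx)
    (by simp [PySem.Set.len, PySem.Set.empty])]
  simp
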